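-- pv_equiv track=rewrite | github.com/alexandraback/datacollection | solutions_5631989306621952_0/Python/basaundi/main.py | solution
-- ===== SOURCE A (Python) =====
-- from collections import deque
--
-- def solution(x):
--     x_it = iter(x)
--     answer = deque([next(x_it)])
--     for l in x_it:
--         if l >= answer[0]:
--             answer.appendleft(l)
--         else:
--             answer.append(l)
--     return "".join(answer)
-- ===== SOURCE B (Python) =====
-- def solution(x):
--     # A character belongs to the front block iff it equals its prefix maximum.
--     m = x[0]
--     pm = []
--     for c in x:
--         if c > m:
--             m = c
--         pm.append(m)
--     records = [c for c, p in zip(x, pm) if c == p]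
--     others = [c for c, p in zip(x, pm) if c != p]
--     return "".join(reversed(records)) + "".join(others)
-- ===== Notes on version B (the rewrite author's own statement) =====
-- stated objective: alternative
-- what changed: Replaces A's online deque insertion with an offline characterization: first compute the prefix-maximum sequence, then partition characters by whether each equals its prefix maximum (these are exactly the ones A prepends), and assemble the result as reversed records plus the rest.
import Mathlib
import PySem

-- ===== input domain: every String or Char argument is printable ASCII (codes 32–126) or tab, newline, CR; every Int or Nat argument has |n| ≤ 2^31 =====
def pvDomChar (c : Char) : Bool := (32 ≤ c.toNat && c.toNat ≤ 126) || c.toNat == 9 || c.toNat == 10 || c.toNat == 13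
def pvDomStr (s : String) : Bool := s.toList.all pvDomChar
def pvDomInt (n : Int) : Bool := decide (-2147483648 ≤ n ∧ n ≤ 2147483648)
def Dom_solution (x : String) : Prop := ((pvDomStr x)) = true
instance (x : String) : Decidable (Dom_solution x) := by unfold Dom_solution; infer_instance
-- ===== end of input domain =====

-- B replaces A's online deque insertion with an offline characterization: compute the prefix-maximum
-- sequence, keep exactly the characters equal to their prefix maximum as the (reversed) front block,
-- the rest in order behind. Return values only; both Pythons raise on "" (excluded by Pre_).

-- ===== PORT A =====
-- A's loop over the remaining characters; the deque is a List Char (answer[0] = head).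
def solGo : List Char → List Char → List Char
  | [], ans => ans
  | l :: rs, ans => solGo rs (if ans.head! ≤ l then l :: ans else ans ++ [l])

def solution (x : String) : String :=
  match x.toList with
  | [] => ""   -- A raises StopIteration here; excluded by Pre_solution
  | c :: rest => String.mk (solGo rest [c])

-- ===== PORT B =====
-- B's first pass: running max m, appending the current max for each character.
def pmLoop : List Char → Char → List Char → List Char
  | [], _, pm => pm
  | c :: rs, m, pm =>
      let m' := if m < c then c else m
      pmLoop rs m' (pm ++ [m'])

def solution_alt (x : String) : String :=
  match x.toList with
  | [] => ""   -- B's x[0] raises here; excluded by Pre_solution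
  | c :: _ =>
      let xs := x.toList
      let pm := pmLoop xs c []
      let pairs := xs.zip pm
      let records := (pairs.filter (fun p => p.1 == p.2)).map Prod.fst
      let others := (pairs.filter (fun p => !(p.1 == p.2))).map Prod.fst
      String.mk (records.reverse ++ others)

-- ===== PRECONDITION & SPEC =====
-- Pre_ excludes only the empty string, on which A raises StopIteration at next().
def Pre_solution (x : String) : Prop := x ≠ ""
instance (x : String) : Decidable (Pre_solution x) := by unfold Pre_solution; infer_instance
def pvWitness_solution : String := ("ba")

def Spec_solution (x : String) (out : String) : Prop := out = solution_alt x
instance (x : String) (out : String) : Decidable (Spec_solution x out) := by unfold Spec_solution; infer_instance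

-- ===== CLAIM (what is proved, stated in full; the proofs are below) =====
def Claim_equal_solution : Prop := ∀ (x : String), Dom_solution x → Pre_solution x → Spec_solution x (solution x)

-- ===== LEMMAS AND PROOFS =====

-- Reference splitter: front block (in scan order) and back block produced from the tail with current max m.
def split : List Char → Char → List Char × List Char
  | [], _ => ([], [])
  | c :: rs, m =>
      if m ≤ c then
        let p := split rs c; (c :: p.1, p.2)
      else
        let p := split rs m; (p.1, c :: p.2)

-- A computes split: the deque is (front.reverse ++ back) with current max = last of front.
lemma keyA : ∀ (rest front back : List Char) (m : Char),
    front.getLast? = some m →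
    solGo rest (front.reverse ++ back)
      = (front ++ (split rest m).1).reverse ++ (back ++ (split rest m).2) := by
  intro rest
  induction rest with
  | nil => intro front back m _; simp [solGo, split]
  | cons l rs ih =>
    intro front back m hm
    obtain ⟨t, ht⟩ : ∃ t, front.reverse = m :: t := by
      have h : front.reverse.head? = some m := by simpa [List.head?_reverse] using hm
      cases hfr : front.reverse with
      | nil => simp [hfr] at h
      | cons a t => exact ⟨t, by simp [hfr] at h ⊢; simp [h]⟩
    have hhead : (front.reverse ++ back).head! = m := by simp [ht, List.head!]
    simp only [solGo, split, hhead]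
    by_cases h : m ≤ l
    · simp only [h, if_true]
      have h1 : l :: (front.reverse ++ back) = (front ++ [l]).reverse ++ back := by simp
      rw [h1, ih (front ++ [l]) back l (by simp)]
      simp
    · simp only [if_neg h]
      have h1 : (front.reverse ++ back) ++ [l] = front.reverse ++ (back ++ [l]) := by simp
      rw [h1, ih front (back ++ [l]) m hm]
      simp

-- The prefix-maximum sequence, head-recursive form.
def pmSeq : List Char → Char → List Char
  | [], _ => []
  | c :: rs, m =>
      let m' := if m < c then c else m
      m' :: pmSeq rs m'

lemma pmLoop_eq : ∀ (rs : List Char) (m : Char) (acc : List Char),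
    pmLoop rs m acc = acc ++ pmSeq rs m := by
  intro rs
  induction rs with
  | nil => intro m acc; simp [pmLoop, pmSeq]
  | cons c rs ih => intro m acc; simp [pmLoop, pmSeq, ih]

-- B's filters compute split.
lemma keyB : ∀ (rs : List Char) (m : Char),
    (((rs.zip (pmSeq rs m)).filter (fun p => p.1 == p.2)).map Prod.fst = (split rs m).1)
  ∧ (((rs.zip (pmSeq rs m)).filter (fun p => !(p.1 == p.2))).map Prod.fst = (split rs m).2) := by
  intro rs
  induction rs with
  | nil => intro m; simp [pmSeq, split]
  | cons c rs ih =>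
    intro m
    by_cases h : m ≤ c
    · have hm' : (if m < c then c else m) = c := by
        by_cases h2 : m < c
        · simp [h2]
        · have : m = c := le_antisymm h (not_lt.mp h2)
          simp [this]
      simp only [pmSeq, split, hm', if_pos h, List.zip_cons_cons, List.filter_cons]
      have := ih c
      simp [this.1, this.2]
    · have hlt : c < m := not_le.mp h
      have hm' : (if m < c then c else m) = m := by simp [not_lt.mpr (le_of_lt hlt)]
      have hne : ¬ (c = m) := ne_of_lt hlt
      simp only [pmSeq, split, hm', if_neg h, List.zip_cons_cons, List.filter_cons]
      have := ih m
      simp [this.1, this.2, hne]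

-- ===== VERDICT (by name: the statement is the Claim_ definition above) =====
theorem solution_spec : Claim_equal_solution := by
  intro x _ hpre
  unfold Spec_solution solution solution_alt
  cases hx : x.toList with
  | nil => exact absurd (String.toList_inj.mp (by simp [hx])) hpre
  | cons c rest =>
    have hA : solGo rest [c]
        = ([c] ++ (split rest c).1).reverse ++ ([] ++ (split rest c).2) := by
      have := keyA rest [c] [] c (by simp)
      simpa using this
    have hpm : pmLoop (c :: rest) c [] = c :: pmSeq rest c := by
      simp [pmLoop_eq, pmSeq]
    have hB := keyB rest c
    simp only [hx, hA, hpm, List.zip_cons_cons, List.filter_cons]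
    simp [hB.1, hB.2]
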